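-- pv_equiv track=rewrite | github.com/Tamburini-Christofer/SnackJs-From-FreeCodeCamp | Python/1.Agosto/10.3Strikes-20Agosto.py | squares_with_three
-- ===== SOURCE A (Python) =====
-- def squares_with_three(n):
--
--     if n == 1: return 0
--
--     cont = 0;
--
--     for number in range(1, n + 1):
--         quadrato = number ** 2
--         if "3" in str(quadrato):
--             cont += 1
--
--     return cont
-- ===== SOURCE B (Python) =====
-- def squares_with_three(n):
--     def has3(q):
--         while q:
--             if q % 10 == 3:
--                 return True
--             q //= 10
--         return False
--
--     def count(lo, hi):  # number of k in [lo, hi) whose square contains digit 3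
--         if hi - lo <= 0:
--             return 0
--         if hi - lo == 1:
--             return 1 if has3(lo * lo) else 0
--         mid = (lo + hi) // 2
--         return count(lo, mid) + count(mid, hi)
--
--     return count(1, n + 1)
-- ===== Notes on version B (the rewrite author's own statement) =====
-- stated objective: alternative
-- what changed: Replaces A's linear fold over range(1,n+1) with string membership by a divide-and-conquer recursion that splits the interval in half and sums the two counts, testing the digit at the leaves with an arithmetic mod/div scan instead of str(); A's redundant early-return guard disappears.
import Mathlib
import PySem

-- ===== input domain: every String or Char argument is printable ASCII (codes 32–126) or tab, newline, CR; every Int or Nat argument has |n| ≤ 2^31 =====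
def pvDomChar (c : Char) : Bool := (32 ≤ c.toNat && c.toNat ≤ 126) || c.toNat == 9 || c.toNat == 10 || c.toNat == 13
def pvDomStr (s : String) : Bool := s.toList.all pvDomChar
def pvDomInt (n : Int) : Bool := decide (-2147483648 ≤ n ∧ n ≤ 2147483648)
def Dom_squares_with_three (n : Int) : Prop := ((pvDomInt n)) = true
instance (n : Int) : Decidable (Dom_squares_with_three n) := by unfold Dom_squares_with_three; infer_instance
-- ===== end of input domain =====

-- B counts by divide-and-conquer: it splits the interval [1, n+1) in half recursively and sums the two counts, testing the square's digits arithmetically (mod/div) at the leaves instead of "3" in str(...); equal to A on all inputs (alternative structure, no speed claim).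


-- ===== PORT A =====
def squares_with_three (n : Int) : Int :=
  if n = 1 then 0
  else
    (PySem.List.pyRange 1 (n + 1) 1).foldl
      (fun cont number =>
        let quadrato := number ^ 2
        if PySem.Str.isIn "3" (PySem.Int.toStr quadrato) then cont + 1 else cont)
      0

-- ===== PORT B =====
-- inner 'while q:' digit scan of has3; q = lo*lo is always ≥ 0, so the Nat recursion is exact
def pvHasThree (q : Nat) : Bool :=
  if q = 0 then false
  else if q % 10 = 3 then true
  else pvHasThree (q / 10)
decreasing_by exact Nat.div_lt_self (Nat.pos_of_ne_zero (by assumption)) (by norm_num)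

-- the recursive 'count(lo, hi)': split the interval at mid = (lo+hi)//2 and add the halves
def pvCountAlt (lo hi : Int) : Int :=
  if h0 : hi - lo ≤ 0 then 0
  else if h1 : hi - lo = 1 then (if pvHasThree ((lo * lo).toNat) then 1 else 0)
  else
    let mid := PySem.Int.floordiv (lo + hi) 2
    pvCountAlt lo mid + pvCountAlt mid hi
termination_by (hi - lo).toNat
decreasing_by
  · have : Int.fdiv (lo + hi) 2 = (lo + hi) / 2 := by simp [Int.fdiv_eq_ediv]
    simp only [PySem.Int.floordiv, this] at *; omega
  · have : Int.fdiv (lo + hi) 2 = (lo + hi) / 2 := by simp [Int.fdiv_eq_ediv]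
    simp only [PySem.Int.floordiv, this] at *; omega

def squares_with_three_alt (n : Int) : Int := pvCountAlt 1 (n + 1)

-- ===== PRECONDITION & SPEC =====
def Spec_squares_with_three (n : Int) (out : Int) : Prop := out = squares_with_three_alt n
instance (n : Int) (out : Int) : Decidable (Spec_squares_with_three n out) := by unfold Spec_squares_with_three; infer_instance

-- ===== CLAIM (what is proved, stated in full; the proofs are below) =====
def Claim_equal_squares_with_three : Prop := ∀ (n : Int), Dom_squares_with_three n → Spec_squares_with_three n (squares_with_three n)

-- ===== LEMMAS AND PROOFS =====

-- digitChar hits '3' exactly on digit 3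
lemma pv_digitChar_eq_three {r : Nat} (hr : r < 10) : Nat.digitChar r = '3' ↔ r = 3 := by
  interval_cases r <;> simp [Nat.digitChar]

-- membership of '3' in the digit string produced by toDigitsCore, vs the arithmetic scan
lemma pv_toDigitsCore_mem_three :
    ∀ (f n : Nat) (ds : List Char), n < f →
      ('3' ∈ Nat.toDigitsCore 10 f n ds ↔ (n % 10 = 3 ∨ pvHasThree (n / 10) = true ∨ '3' ∈ ds)) := by
  intro f
  induction f with
  | zero => intro n ds h; omega
  | succ f ih =>
    intro n ds h
    have hd : ('3' = (n % 10).digitChar) ↔ n % 10 = 3 := by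
      rw [eq_comm, pv_digitChar_eq_three (Nat.mod_lt _ (by norm_num))]
    rw [Nat.toDigitsCore]
    by_cases h0 : n / 10 = 0
    · rw [h0]
      simp [List.mem_cons, hd, pvHasThree]
    · rw [if_neg h0]
      rw [ih (n / 10) _ (by omega)]
      rw [List.mem_cons]
      have hh : pvHasThree (n / 10) = true ↔ (n / 10 % 10 = 3 ∨ pvHasThree (n / 10 / 10) = true) := by
        rw [pvHasThree]
        simp only [if_neg h0]
        by_cases h3 : n / 10 % 10 = 3 <;> simp [h3]
      rw [hh]
      simp only [hd]
      tauto

-- the two per-number tests agree on positive squares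
lemma pv_test_eq (m : Int) (hm : 1 ≤ m) :
    PySem.Str.isIn "3" (PySem.Int.toStr (m ^ 2)) = pvHasThree ((m * m).toNat) := by
  have hsq : (1 : Int) ≤ m * m := by nlinarith
  have hpow : m ^ 2 = m * m := sq m
  rw [Bool.eq_iff_iff, PySem.Str.isIn_iff_infix]
  have htl : (PySem.Int.toStr (m ^ 2)).toList = Nat.toDigits 10 (m * m).toNat := by
    rw [PySem.Int.toStr, hpow]
    have : ¬ (m * m < 0) := by omega
    simp [PySem.Int.toChars, this]
  rw [htl]
  have hsing : (("3" : String).toList = ['3']) := rfl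
  rw [hsing]
  set N := (m * m).toNat with hN
  have hN1 : 1 ≤ N := by omega
  have hmem : ['3'] <:+: Nat.toDigits 10 N ↔ '3' ∈ Nat.toDigits 10 N := by
    constructor
    · intro h; exact h.subset (by simp)
    · intro h
      obtain ⟨s, t, hst⟩ := List.append_of_mem h
      exact ⟨s, t, by simp [hst]⟩
  rw [hmem, Nat.toDigits]
  rw [pv_toDigitsCore_mem_three (N + 1) N [] (by omega)]
  have hr : pvHasThree N = true ↔ (N % 10 = 3 ∨ pvHasThree (N / 10) = true) := by
    rw [pvHasThree]
    simp only [if_neg (show ¬ N = 0 by omega)]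
    by_cases h3 : N % 10 = 3 <;> simp [h3]
  rw [hr]
  simp

-- A's fold over pyRange lo hi equals c + pvCountAlt lo hi, by strong induction on the interval length
lemma pv_fold_eq (lo hi : Int) (hlo : 1 ≤ lo) (c : Int) :
    (PySem.List.pyRange lo hi 1).foldl
      (fun cont number =>
        let quadrato := number ^ 2
        if PySem.Str.isIn "3" (PySem.Int.toStr quadrato) then cont + 1 else cont)
      c = c + pvCountAlt lo hi := by
  by_cases h0 : hi - lo ≤ 0
  · rw [PySem.List.pyRange_one_eq_nil (by omega), pvCountAlt, dif_pos h0]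
    simp
  · by_cases h1 : hi - lo = 1
    · rw [PySem.List.pyRange_one_cons (by omega), PySem.List.pyRange_one_eq_nil (by omega)]
      rw [pvCountAlt, dif_neg h0, dif_pos h1]
      simp only [List.foldl_cons, List.foldl_nil]
      rw [pv_test_eq lo hlo]
      by_cases ht : pvHasThree ((lo * lo).toNat) <;> simp [ht]
    · have hmid : PySem.Int.floordiv (lo + hi) 2 = (lo + hi) / 2 := by
        simp [PySem.Int.floordiv, Int.fdiv_eq_ediv]
      have hb1 : lo ≤ (lo + hi) / 2 := by omega
      have hb2 : (lo + hi) / 2 ≤ hi := by omega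
      have hsplit : pvCountAlt lo hi =
          pvCountAlt lo ((lo + hi) / 2) + pvCountAlt ((lo + hi) / 2) hi := by
        rw [pvCountAlt]
        simp only [dif_neg h0, dif_neg h1, hmid]
      rw [PySem.List.pyRange_one_append lo ((lo + hi) / 2) hi hb1 hb2, List.foldl_append]
      rw [pv_fold_eq lo ((lo + hi) / 2) hlo c]
      rw [pv_fold_eq ((lo + hi) / 2) hi (by omega) _]
      rw [hsplit]
      ring
termination_by (hi - lo).toNat
decreasing_by all_goals omega

-- ===== VERDICT (by name: the statement is the Claim_ definition above) =====
theorem squares_with_three_spec : Claim_equal_squares_with_three := by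
  intro n _
  unfold Spec_squares_with_three squares_with_three squares_with_three_alt
  by_cases h1 : n = 1
  · subst h1
    rw [if_pos rfl]
    have h := pv_fold_eq 1 (1 + 1) le_rfl 0
    simp only [zero_add] at h
    rw [← h]
    decide
  · rw [if_neg h1]
    have h := pv_fold_eq 1 (n + 1) le_rfl 0
    rw [h]; ring
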